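-- pv_equiv track=rewrite | github.com/universuen/simple-neural-network | myNetwork.py | mt_v_mul
-- ===== SOURCE A (Python) =====
-- def mt_v_mul(m: list, v: list) -> list:
--     assert len(m) == len(v)
--     # 有点困了，先用一个很笨的方法得到转置矩阵 =_=
--     mt = [[0 for j in range(len(m))] for i in range(len(m[0]))]
--     for i in range(len(m)):
--         for j in range(len(m[0])):
--             mt[j][i] = m[i][j]
--     # 然后用一个很笨的方法算乘法
--     result = []
--     for i in range(len(mt)):
--         temp = 0
--         for j in range(len(mt[0])):
--             temp = temp + mt[i][j] * v[j]
--         result.append(temp)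
--     return result
-- ===== SOURCE B (Python) =====
-- def mt_v_mul(m: list, v: list) -> list:
--     assert len(m) == len(v)
--     # no transpose: one comprehension, summing down each column in row order
--     return [sum(row[j] * x for row, x in zip(m, v)) for j in range(len(m[0]))]
-- ===== Notes on version B (the rewrite author's own statement) =====
-- stated objective: idiomatic
-- what changed: B drops the intermediate transpose matrix and both index-mutation loops, computing each output entry directly as a zip-based column sum in a single comprehension.
import Mathlib
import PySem

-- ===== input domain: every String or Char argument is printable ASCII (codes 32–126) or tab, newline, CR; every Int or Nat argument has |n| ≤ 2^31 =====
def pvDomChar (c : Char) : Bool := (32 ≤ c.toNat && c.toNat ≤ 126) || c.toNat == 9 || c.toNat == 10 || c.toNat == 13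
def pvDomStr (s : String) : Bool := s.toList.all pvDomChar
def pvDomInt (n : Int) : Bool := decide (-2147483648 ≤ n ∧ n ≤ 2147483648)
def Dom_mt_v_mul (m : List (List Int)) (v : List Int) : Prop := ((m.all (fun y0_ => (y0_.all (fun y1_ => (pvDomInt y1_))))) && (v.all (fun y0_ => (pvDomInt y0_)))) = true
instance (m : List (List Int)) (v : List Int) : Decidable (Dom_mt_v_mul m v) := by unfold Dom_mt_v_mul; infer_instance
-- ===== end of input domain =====

-- B replaces A's transpose-then-multiply with a single zip-based comprehension (idiomatic, no intermediate table).

-- ===== PORT A =====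
-- Python list assignment xs[i] = x; exact for the nonnegative in-range indices range() produces here
def pySet {α : Type} (xs : List α) (i : Int) (x : α) : List α := xs.set i.toNat x

def mt_v_mul (m : List (List Int)) (v : List Int) : List Int :=
  let mt0 : List (List Int) :=
    (PySem.List.pyRange 0 ((PySem.List.pyGetD m 0 []).length : Int)).map (fun _ =>
      (PySem.List.pyRange 0 (m.length : Int)).map (fun _ => (0 : Int)))
  let mt : List (List Int) :=
    (PySem.List.pyRange 0 (m.length : Int)).foldl (fun mt i =>
      (PySem.List.pyRange 0 ((PySem.List.pyGetD m 0 []).length : Int)).foldl (fun mt j =>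
        pySet mt j (pySet (PySem.List.pyGetD mt j []) i
          (PySem.List.pyGetD (PySem.List.pyGetD m i []) j 0))) mt) mt0
  (PySem.List.pyRange 0 (mt.length : Int)).foldl (fun result i =>
    result ++ [(PySem.List.pyRange 0 ((PySem.List.pyGetD mt 0 []).length : Int)).foldl
      (fun temp j => temp + PySem.List.pyGetD (PySem.List.pyGetD mt i []) j 0 * PySem.List.pyGetD v j 0) 0])
    []

-- ===== PORT B =====
def mt_v_mul_alt (m : List (List Int)) (v : List Int) : List Int :=
  (PySem.List.pyRange 0 ((PySem.List.pyGetD m 0 []).length : Int)).map (fun j =>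
    ((m.zip v).map (fun p => PySem.List.pyGetD p.1 j 0 * p.2)).sum)

-- ===== PRECONDITION & SPEC =====
-- Pre_ excludes exactly where Python A raises: the assert (len mismatch, AssertionError),
-- empty m (m[0] IndexError), and rows shorter than row 0 (m[i][j] IndexError).
def Pre_mt_v_mul (m : List (List Int)) (v : List Int) : Prop :=
  m ≠ [] ∧ m.length = v.length ∧ ∀ row ∈ m, (PySem.List.pyGetD m 0 []).length ≤ row.length
instance (m : List (List Int)) (v : List Int) : Decidable (Pre_mt_v_mul m v) := by unfold Pre_mt_v_mul; infer_instance
def pvWitness_mt_v_mul : List (List Int) × List Int := ([[1, 2], [3, 4]], [5, 6])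

def Spec_mt_v_mul (m : List (List Int)) (v : List Int) (out : List Int) : Prop := out = mt_v_mul_alt m v
instance (m : List (List Int)) (v : List Int) (out : List Int) : Decidable (Spec_mt_v_mul m v out) := by unfold Spec_mt_v_mul; infer_instance

-- ===== CLAIM (what is proved, stated in full; the proofs are below) =====
def Claim_equal_mt_v_mul : Prop := ∀ (m : List (List Int)) (v : List Int), Dom_mt_v_mul m v → Pre_mt_v_mul m v → Spec_mt_v_mul m v (mt_v_mul m v)

-- ===== LEMMAS AND PROOFS =====

theorem foldl_set_go {α : Type} (f : Int → α → α) (d : α) :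
    ∀ (zs ys : List α),
      (PySem.List.pyRange (ys.length : Int) ((ys.length + zs.length : Nat) : Int)).foldl
          (fun acc j => acc.set j.toNat (f j (PySem.List.pyGetD acc j d))) (ys ++ zs)
        = ys ++ (zs.zipIdx ys.length).map (fun p => f (p.2 : Int) p.1) := by
  intro zs
  induction zs with
  | nil =>
    intro ys
    rw [PySem.List.pyRange_one_eq_nil (by simp)]
    simp
  | cons z zs ih =>
    intro ys
    have hb : ((ys.length + (z :: zs).length : Nat) : Int) = ((ys.length + 1 + zs.length : Nat) : Int) := by
      push_cast [List.length_cons]; omega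
    rw [hb, PySem.List.pyRange_one_cons (by push_cast [List.length_cons]; omega)]
    simp only [List.foldl_cons]
    have hget : PySem.List.pyGetD (ys ++ z :: zs) (ys.length : Int) d = z := by
      rw [PySem.List.pyGetD_natCast]
      simp [List.getD_eq_getElem?_getD]
    have hset : (ys ++ z :: zs).set ((ys.length : Int)).toNat (f (ys.length : Int) z)
        = (ys ++ [f (ys.length : Int) z]) ++ zs := by
      simp
    rw [hget, hset]
    have h2 : ((ys.length : Int) + 1) = (((ys ++ [f (ys.length : Int) z]).length : Nat) : Int) := by
      simp
    have h3 : ((ys.length + 1 + zs.length : Nat) : Int) = (((ys ++ [f (ys.length : Int) z]).length + zs.length : Nat) : Int) := by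
      simp
    rw [h2, h3, ih]
    simp [List.zipIdx_cons]

theorem foldl_set_eq {α : Type} (f : Int → α → α) (d : α) (xs : List α) :
    (PySem.List.pyRange 0 (xs.length : Int)).foldl
        (fun acc j => acc.set j.toNat (f j (PySem.List.pyGetD acc j d))) xs
      = (xs.zipIdx).map (fun p => f (p.2 : Int) p.1) := by
  have h := foldl_set_go f d xs []
  simpa using h

def colPart (m : List (List Int)) (k j : Nat) : List Int :=
  (List.range m.length).map (fun t =>
    if t < k then PySem.List.pyGetD (PySem.List.pyGetD m (t : Int) []) (j : Int) 0 else 0)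


theorem fill_eq (m : List (List Int)) (k : Nat) (hk : k ≤ m.length) :
    (PySem.List.pyRange 0 (k : Int)).foldl (fun mt i =>
      (PySem.List.pyRange 0 ((PySem.List.pyGetD m 0 []).length : Int)).foldl (fun mt j =>
        pySet mt j (pySet (PySem.List.pyGetD mt j []) i
          (PySem.List.pyGetD (PySem.List.pyGetD m i []) j 0))) mt)
      ((PySem.List.pyRange 0 ((PySem.List.pyGetD m 0 []).length : Int)).map (fun _ =>
        (PySem.List.pyRange 0 (m.length : Int)).map (fun _ => (0 : Int))))
    = (List.range (PySem.List.pyGetD m 0 []).length).map (fun j => colPart m k j) := by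
  set cols := (PySem.List.pyGetD m 0 []).length with hcols
  induction k with
  | zero =>
    rw [show ((0:Nat):Int) = 0 by simp, PySem.List.pyRange_one_eq_nil le_rfl]
    simp only [List.foldl_nil]
    rw [PySem.List.pyRange_zero_nat cols, List.map_map]
    apply List.map_congr_left
    intro j hj
    rw [PySem.List.pyRange_zero_nat m.length, List.map_map]
    simp [colPart, Function.comp_def, List.map_const']
  | succ k ih =>
    have hk' : k ≤ m.length := Nat.le_of_succ_le hk
    have hcast : ((k + 1 : Nat) : Int) = (k : Int) + 1 := by push_cast; ring
    rw [hcast, PySem.List.pyRange_one_succ_right (by positivity), List.foldl_append, ih hk']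
    simp only [List.foldl_cons, List.foldl_nil]
    -- rewrite inner fold via foldl_set_eq
    have hlen : ((List.range cols).map (fun j => colPart m k j)).length = cols := by simp
    have hbnd : ((cols : Nat) : Int) = (((List.range cols).map (fun j => colPart m k j)).length : Int) := by
      rw [hlen]
    rw [hbnd]
    have := foldl_set_eq (fun j row => pySet row (k : Int) (PySem.List.pyGetD (PySem.List.pyGetD m (k : Int) []) j 0)) ([] : List Int)
      ((List.range cols).map (fun j => colPart m k j))
    simp only [pySet] at this ⊢
    rw [this]
    -- now elementwise
    apply List.ext_getElem
    · simp
    · intro j h1 h2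
      simp only [List.getElem_map, List.getElem_zipIdx, List.getElem_range]
      have hj : j < cols := by simpa using h2
      simp only [Int.toNat_natCast, zero_add]
      -- goal: (colPart m k j).set k (pyGetD (pyGetD m k []) j 0) = colPart m (k+1) j
      apply List.ext_getElem
      · simp [colPart]
      · intro t ht1 ht2
        have htr : t < m.length := by simpa [colPart] using ht2
        simp only [colPart, List.getElem_set, List.getElem_map, List.getElem_range]
        by_cases hkt : t = k
        · subst hkt
          simp
        · rw [if_neg (fun h => hkt h.symm)]
          by_cases h3 : t < k
          · rw [if_pos h3, if_pos (by omega)]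
          · rw [if_neg h3, if_neg (by omega)]

theorem main (m : List (List Int)) (v : List Int) (hlen : m.length = v.length) :
    mt_v_mul m v = mt_v_mul_alt m v := by
  unfold mt_v_mul mt_v_mul_alt
  set cols := (PySem.List.pyGetD m 0 []).length with hcols
  have hfill := fill_eq m m.length le_rfl
  simp only []
  rw [hfill]
  -- characterize the final column: colPart m m.length j
  set mt := (List.range cols).map (fun j => colPart m m.length j) with hmt
  have hmtlen : mt.length = cols := by simp [hmt]
  have hcolP : ∀ j, (colPart m m.length j).length = m.length := by
    intro j; simp [colPart]
  -- result loop → map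
  rw [PySem.List.foldl_append_singleton_eq_map]
  simp only [List.nil_append]
  rw [hmtlen]
  rw [PySem.List.pyRange_zero_nat cols, List.map_map, List.map_map]
  apply List.map_congr_left
  intro j hj
  have hjc : j < cols := List.mem_range.mp hj
  have hcols0 : 0 < cols := by omega
  -- pyGetD mt 0 [] = colPart m m.length 0
  have hmt0 : PySem.List.pyGetD mt 0 [] = colPart m m.length 0 := by
    rw [show (0:Int) = ((0:Nat):Int) by simp, PySem.List.pyGetD_natCast]
    rw [hmt]
    rw [List.getD_eq_getElem _ _ (by simp; omega)]
    simp
  have hmtj : PySem.List.pyGetD mt (j : Int) [] = colPart m m.length j := by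
    rw [PySem.List.pyGetD_natCast, hmt, List.getD_eq_getElem _ _ (by simp; omega)]
    simp
  simp only [Function.comp_apply]
  rw [hmt0, hmtj, hcolP 0]
  rw [PySem.List.foldl_add]
  rw [zero_add]
  congr 1
  -- the two mapped lists are equal
  apply List.ext_getElem
  · simp [PySem.List.length_pyRange_one, hlen]
  · intro t h1 h2
    have htm : t < m.length := by
      simp [PySem.List.length_pyRange_one] at h1; omega
    have htv : t < v.length := hlen ▸ htm
    rw [List.getElem_map, List.getElem_map, PySem.List.getElem_pyRange_one, List.getElem_zip]
    simp only [zero_add]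
    have h5 : PySem.List.pyGetD (colPart m m.length j) ((t:Nat):Int) 0 = PySem.List.pyGetD m[t] (j:Int) 0 := by
      rw [PySem.List.pyGetD_natCast, List.getD_eq_getElem _ _ (by simp [colPart]; omega)]
      simp [colPart, htm]
    rw [h5]
    rw [show PySem.List.pyGetD v ((t:Nat):Int) 0 = v[t] by
      rw [PySem.List.pyGetD_natCast, List.getD_eq_getElem _ _ htv]]

-- ===== VERDICT (by name: the statement is the Claim_ definition above) =====
theorem mt_v_mul_spec : Claim_equal_mt_v_mul := by
  intro m v _ hpre
  unfold Spec_mt_v_mul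
  exact main m v hpre.2.1
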